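-- pv_equiv track=rewrite | github.com/ptse8204/GTFSTools | gtfs_explorer_stable.py | _min_hops_to_set
-- ===== SOURCE A (Python) =====
-- from typing import Dict, List, Tuple, Optional
--
-- def _min_hops_to_set(start: str, targets: set, adj: Dict[str,set], max_hops: int = 64) -> int:
--     """
--     BFS in the undirected stop graph to the nearest node in targets.
--     Returns hop count (edges). If unreachable, returns max_hops+1.
--     """
--     if not targets or start in targets:
--         return 0 if start in targets else max_hops + 1
--     q = [(start, 0)]
--     seen = {start}
--     while q:
--         u, h = q.pop(0)
--         if h >= max_hops:
--             return max_hops + 1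
--         for v in adj.get(u, ()):
--             if v in seen:
--                 continue
--             if v in targets:
--                 return h + 1
--             seen.add(v); q.append((v, h + 1))
--     return max_hops + 1
-- ===== SOURCE B (Python) =====
-- def _min_hops_to_set(start: str, targets: set, adj, max_hops: int = 64) -> int:
--     """Reachable-set saturation: no queue/frontier -- repeatedly expand the whole
--     reachable set one edge at a time until a target appears or it stops growing."""
--     if not targets or start in targets:
--         return 0 if start in targets else max_hops + 1
--     reach = {start}
--     hop = 0
--     while hop < max_hops:
--         new = set()
--         for u in reach:
--             new.update(adj.get(u, ()))
--         if new & targets: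
--             return hop + 1
--         fresh = new - reach
--         if not fresh:
--             return max_hops + 1
--         reach |= fresh
--         hop += 1
--     return max_hops + 1
-- ===== Notes on version B (the rewrite author's own statement) =====
-- stated objective: alternative
-- what changed: Replaced the FIFO queue of (node, hop) pairs and its per-node visited checks by reachable-set saturation: no queue and no frontier at all, each round recomputes the neighbour set of the ENTIRE reachable set with set unions, tests it against the targets by set intersection, and stops when it no longer grows.
import Mathlib
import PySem

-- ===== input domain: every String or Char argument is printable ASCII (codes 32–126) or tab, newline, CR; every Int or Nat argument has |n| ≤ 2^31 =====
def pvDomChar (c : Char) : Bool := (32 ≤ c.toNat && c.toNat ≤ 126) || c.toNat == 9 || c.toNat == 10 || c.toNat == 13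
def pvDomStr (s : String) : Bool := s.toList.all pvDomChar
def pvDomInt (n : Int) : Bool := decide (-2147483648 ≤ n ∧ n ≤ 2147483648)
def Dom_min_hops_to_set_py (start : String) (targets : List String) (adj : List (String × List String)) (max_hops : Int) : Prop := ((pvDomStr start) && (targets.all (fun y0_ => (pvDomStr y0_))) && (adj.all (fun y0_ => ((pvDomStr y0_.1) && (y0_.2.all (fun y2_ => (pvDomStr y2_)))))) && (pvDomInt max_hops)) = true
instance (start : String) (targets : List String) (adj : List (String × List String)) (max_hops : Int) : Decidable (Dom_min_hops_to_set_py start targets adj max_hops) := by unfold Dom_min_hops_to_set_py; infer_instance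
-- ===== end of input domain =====

-- B replaces A's FIFO queue of (node, hop) pairs and per-node seen checks by
-- reachable-set saturation: each round re-expands the WHOLE reachable set with set
-- unions and stops when it hits a target or stops growing (objective: alternative).


-- Fuel for A's `while q:` loop: one unit per `q.pop(0)`.  Every queue entry is enqueued
-- together with a fresh `seen` insertion, and `seen` holds distinct nodes drawn from
-- {start} ∪ (adjacency values), so `2 + Σ |adj values|` pops can never be exhausted.
-- (The equivalence proof shows the fuel sentinel is unreachable from the entry state.)
def pvFuel (adj : List (String × List String)) : Nat :=
  adj.foldl (fun a p => a + p.2.length) 2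

-- ===== PORT A =====
-- inner `for v in adj.get(u, ())` loop: returns (early-return value, seen, q)
def aInner (targets : List String) (h : Int) :
    List String → PySem.Set String → List (String × Int) →
    Option Int × PySem.Set String × List (String × Int)
  | [], seen, q => (none, seen, q)
  | v :: vs, seen, q =>
    if PySem.Set.contains seen v then aInner targets h vs seen q
    else if targets.contains v then (some (h + 1), seen, q)
    else aInner targets h vs (PySem.Set.add seen v) (q ++ [(v, h + 1)])

-- the `while q:` loop; one fuel unit per `q.pop(0)`
def aLoop (targets : List String) (adj : PySem.Dict String (List String)) (max_hops : Int) :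
    Nat → List (String × Int) → PySem.Set String → Int
  | 0, _, _ => max_hops + 1           -- fuel sentinel (unreachable with pvFuel, see above)
  | fuel + 1, q, seen =>
    match q with
    | [] => max_hops + 1
    | (u, h) :: q' =>
      if max_hops ≤ h then max_hops + 1
      else
        match aInner targets h (PySem.Dict.getD adj u []) seen q' with
        | (some r, _, _) => r
        | (none, seen', q'') => aLoop targets adj max_hops fuel q'' seen'

def min_hops_to_set_py (start : String) (targets : List String) (adj : List (String × List String)) (max_hops : Int) : Int :=
  if targets.isEmpty || targets.contains start then
    (if targets.contains start then 0 else max_hops + 1)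
  else
    aLoop targets (PySem.Dict.ofList adj) max_hops (pvFuel adj)
      [(start, 0)] (PySem.Set.ofList [start])

-- ===== PORT B =====
-- `new = set(); for u in reach: new.update(adj.get(u, ()))`
def bNew (adj : PySem.Dict String (List String)) (reach : PySem.Set String) : PySem.Set String :=
  reach.foldl (fun acc u => PySem.Set.update acc (PySem.Dict.getD adj u [])) PySem.Set.empty

-- `while hop < max_hops:` — `rounds` counts the remaining iterations, (max_hops - hop).toNat
def sLoop (targets : List String) (adj : PySem.Dict String (List String)) (max_hops : Int) :
    Nat → Int → PySem.Set String → Int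
  | 0, _, _ => max_hops + 1
  | rounds + 1, hop, reach =>
    if PySem.Set.inter (bNew adj reach) targets ≠ [] then hop + 1
    else if PySem.Set.diff (bNew adj reach) reach = [] then max_hops + 1
    else sLoop targets adj max_hops rounds (hop + 1)
        (PySem.Set.union reach (PySem.Set.diff (bNew adj reach) reach))

def min_hops_to_set_py_alt (start : String) (targets : List String) (adj : List (String × List String)) (max_hops : Int) : Int :=
  if targets.isEmpty || targets.contains start then
    (if targets.contains start then 0 else max_hops + 1)
  else
    sLoop targets (PySem.Dict.ofList adj) max_hops max_hops.toNat 0 (PySem.Set.ofList [start])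

-- ===== PRECONDITION & SPEC =====
def Spec_min_hops_to_set_py (start : String) (targets : List String) (adj : List (String × List String)) (max_hops : Int) (out : Int) : Prop := out = min_hops_to_set_py_alt start targets adj max_hops
instance (start : String) (targets : List String) (adj : List (String × List String)) (max_hops : Int) (out : Int) : Decidable (Spec_min_hops_to_set_py start targets adj max_hops out) := by unfold Spec_min_hops_to_set_py; infer_instance

-- ===== CLAIM (what is proved, stated in full; the proofs are below) =====
def Claim_equal_min_hops_to_set_py : Prop := ∀ (start : String) (targets : List String) (adj : List (String × List String)) (max_hops : Int), Dom_min_hops_to_set_py start targets adj max_hops → Spec_min_hops_to_set_py start targets adj max_hops (min_hops_to_set_py start targets adj max_hops)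

-- ===== LEMMAS AND PROOFS =====
-- Proof-side frontier BFS: an intermediate between A's queue and B's saturation.
-- fVisit/fExpand/fLoop expand one LEVEL at a time, consuming one fuel unit per node,
-- exactly in step with A's queue; sat_sim then relates them to B's saturation.
def fVisit (targets : List String) (hop : Int) :
    List String → PySem.Set String → List String →
    Option Int × PySem.Set String × List String
  | [], seen, nxt => (none, seen, nxt)
  | v :: vs, seen, nxt =>
    if PySem.Set.contains seen v then fVisit targets hop vs seen nxt
    else if targets.contains v then (some (hop + 1), seen, nxt)
    else fVisit targets hop vs (PySem.Set.add seen v) (nxt ++ [v])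

def fExpand (targets : List String) (adj : PySem.Dict String (List String)) (max_hops hop : Int) :
    Nat → List String → PySem.Set String → List String →
    Nat × Option Int × PySem.Set String × List String
  | fuel, [], seen, nxt => (fuel, none, seen, nxt)
  | 0, _ :: _, seen, nxt => (0, some (max_hops + 1), seen, nxt)
  | fuel + 1, u :: us, seen, nxt =>
    match fVisit targets hop (PySem.Dict.getD adj u []) seen nxt with
    | (some r, seen', nxt') => (fuel, some r, seen', nxt')
    | (none, seen', nxt') => fExpand targets adj max_hops hop fuel us seen' nxt'

theorem fExpand_fst_le (targets : List String) (adj : PySem.Dict String (List String))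
    (max_hops hop : Int) :
    ∀ (fuel : Nat) (front : List String) (seen : PySem.Set String) (nxt : List String),
      (fExpand targets adj max_hops hop fuel front seen nxt).1 ≤ fuel := by
  intro fuel
  induction fuel with
  | zero => intro front seen nxt; cases front <;> simp [fExpand]
  | succ f ih =>
    intro front seen nxt
    cases front with
    | nil => simp [fExpand]
    | cons u us =>
      simp only [fExpand]
      rcases h : fVisit targets hop (PySem.Dict.getD adj u []) seen nxt with ⟨r, seen', nxt'⟩
      cases r with
      | none => exact Nat.le_succ_of_le (ih us seen' nxt')
      | some r => exact Nat.le_succ f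

theorem fExpand_fst_lt (targets : List String) (adj : PySem.Dict String (List String))
    (max_hops hop : Int) (fuel : Nat) (u : String) (us : List String)
    (seen : PySem.Set String) (nxt : List String)
    (hnone : (fExpand targets adj max_hops hop fuel (u :: us) seen nxt).2.1 = none) :
    (fExpand targets adj max_hops hop fuel (u :: us) seen nxt).1 < fuel := by
  cases fuel with
  | zero => simp [fExpand] at hnone
  | succ f =>
    simp only [fExpand] at hnone ⊢
    rcases h : fVisit targets hop (PySem.Dict.getD adj u []) seen nxt with ⟨r, seen', nxt'⟩
    rw [h] at hnone
    cases r with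
    | some r => simp at hnone
    | none =>
      cases us with
      | nil => simp [fExpand]
      | cons w ws =>
        exact Nat.lt_succ_of_le (fExpand_fst_le targets adj max_hops hop f (w :: ws) seen' nxt')

def fLoop (targets : List String) (adj : PySem.Dict String (List String)) (max_hops : Int)
    (fuel : Nat) (frontier : List String) (seen : PySem.Set String) (hop : Int) : Int :=
  match hfr : frontier with
  | [] => max_hops + 1
  | u :: us =>
    if max_hops ≤ hop then max_hops + 1
    else
      match hex : fExpand targets adj max_hops hop fuel (u :: us) seen [] with
      | (_, some r, _, _) => r
      | (fuel', none, seen', nxt) =>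
        have : fuel' < fuel := by
          have := fExpand_fst_lt targets adj max_hops hop fuel u us seen []
            (by rw [hex])
          rw [hex] at this; exact this
        fLoop targets adj max_hops fuel' nxt seen' (hop + 1)
  termination_by fuel

-- A's inner loop over the tail `Q ++ acc@(h+1)` is the frontier inner loop over `acc`.
theorem inner_sim (targets : List String) (h : Int) :
    ∀ (vs : List String) (seen : PySem.Set String) (Q : List (String × Int)) (acc : List String),
      aInner targets h vs seen (Q ++ acc.map (fun v => (v, h + 1)))
        = ((fVisit targets h vs seen acc).1, (fVisit targets h vs seen acc).2.1,
            Q ++ (fVisit targets h vs seen acc).2.2.map (fun v => (v, h + 1))) := by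
  intro vs
  induction vs with
  | nil => intro seen Q acc; simp [aInner, fVisit]
  | cons v vt ih =>
    intro seen Q acc
    simp only [aInner, fVisit]
    by_cases h1 : PySem.Set.contains seen v = true
    · simp only [h1, if_true]; exact ih seen Q acc
    · simp only [eq_false_of_ne_true h1]
      by_cases h2 : v ∈ targets
      · simp [h2]
      ·
        have h2' : targets.contains v = false := by
          cases hc : targets.contains v with
          | true => exact absurd (by simpa using hc) (by simpa using h2)
          | false => rfl
        simp only [h2', Bool.false_eq_true, if_false]
        have heq : (Q ++ acc.map (fun v => (v, h + 1))) ++ [(v, h + 1)]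
            = Q ++ (acc ++ [v]).map (fun v => (v, h + 1)) := by simp
        rw [heq]
        exact ih (PySem.Set.add seen v) Q (acc ++ [v])

-- mid-level simulation state on the frontier side: `front` still to expand at level `h`,
-- `next` already collected for level `h+1`
def fState (targets : List String) (adj : PySem.Dict String (List String)) (max_hops : Int)
    (fuel : Nat) (front : List String) (next : List String) (seen : PySem.Set String)
    (h : Int) : Int :=
  match front with
  | [] => fLoop targets adj max_hops fuel next seen (h + 1)
  | u :: us =>
    if max_hops ≤ h then max_hops + 1
    else
      match fExpand targets adj max_hops h fuel (u :: us) seen next with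
      | (_, some r, _, _) => r
      | (fuel', none, seen', nxt) => fLoop targets adj max_hops fuel' nxt seen' (h + 1)

theorem fLoop_eq_fState (targets : List String) (adj : PySem.Dict String (List String))
    (max_hops : Int) (fuel : Nat) (front : List String) (seen : PySem.Set String) (hop : Int) :
    fLoop targets adj max_hops fuel front seen hop
      = fState targets adj max_hops fuel front [] seen hop := by
  cases front with
  | nil => simp only [fState]; rw [fLoop, fLoop]
  | cons u us =>
    simp only [fState]
    by_cases hm : max_hops ≤ hop
    · simp [fLoop, hm]
    · simp only [fLoop]
      rw [if_neg hm, if_neg hm]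
      split <;> (rename_i heq; simp [heq])

theorem loop_sim (targets : List String) (adj : PySem.Dict String (List String)) (max_hops : Int) :
    ∀ (fuel : Nat) (front next : List String) (seen : PySem.Set String) (h : Int),
      aLoop targets adj max_hops fuel
          (front.map (fun u => (u, h)) ++ next.map (fun v => (v, h + 1))) seen
        = fState targets adj max_hops fuel front next seen h := by
  intro fuel
  induction fuel with
  | zero =>
    intro front next seen h
    cases front with
    | cons u us =>
      simp only [aLoop, fState, fExpand]
      by_cases hm : max_hops ≤ h <;> simp [hm]
    | nil =>
      cases next with
      | nil => simp [aLoop, fState, fLoop]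
      | cons v vs =>
        simp only [aLoop, fState]
        rw [fLoop_eq_fState]
        simp only [fState, fExpand]
        by_cases hm : max_hops ≤ h + 1 <;> simp [hm]
  | succ f ih =>
    intro front next seen h
    have hcons : ∀ (u : String) (us next' : List String) (seen' : PySem.Set String) (h' : Int),
        aLoop targets adj max_hops (f + 1)
            ((u :: us).map (fun x => (x, h')) ++ next'.map (fun v => (v, h' + 1))) seen'
          = fState targets adj max_hops (f + 1) (u :: us) next' seen' h' := by
      intro u us next' seen' h'
      simp only [aLoop, fState, fExpand, List.map, List.cons_append]
      by_cases hm : max_hops ≤ h'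
      · simp [hm]
      · rw [if_neg hm, if_neg hm]
        rw [inner_sim targets h' (PySem.Dict.getD adj u []) seen'
          (us.map (fun x => (x, h'))) next']
        rcases hv : fVisit targets h' (PySem.Dict.getD adj u []) seen' next'
          with ⟨r, seen'', nxt''⟩
        cases r with
        | some r => simp
        | none =>
          simp only
          rw [ih us nxt'' seen'' h']
          cases us with
          | nil => simp [fState, fExpand]
          | cons w ws =>
            simp only [fState]
            rw [if_neg hm]
    cases front with
    | cons u us => exact hcons u us next seen h
    | nil =>
      cases next with
      | nil => simp [aLoop, fState, fLoop]
      | cons v vs =>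
        simp only [List.map_nil, List.nil_append]
        have hv := hcons v vs [] seen (h + 1)
        simp only [List.map_nil, List.append_nil, List.map_cons] at hv
        simp only [List.map_cons]
        rw [hv]
        have hnil : fState targets adj max_hops (f + 1) [] (v :: vs) seen h
            = fLoop targets adj max_hops (f + 1) (v :: vs) seen (h + 1) := rfl
        rw [hnil, fLoop_eq_fState]

-- ========== frontier BFS = saturation ==========
-- fuel-free one-round expansion: fExpand with enough fuel computes exactly this
def pRound (targets : List String) (adj : PySem.Dict String (List String)) (hop : Int) :
    List String → PySem.Set String → List String →
    Option Int × PySem.Set String × List String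
  | [], seen, nxt => (none, seen, nxt)
  | u :: us, seen, nxt =>
    match fVisit targets hop (PySem.Dict.getD adj u []) seen nxt with
    | (some r, seen', nxt') => (some r, seen', nxt')
    | (none, seen', nxt') => pRound targets adj hop us seen' nxt'

theorem fExpand_eq_pRound (targets : List String) (adj : PySem.Dict String (List String))
    (max_hops hop : Int) :
    ∀ (front : List String) (fuel : Nat) (seen : PySem.Set String) (nxt : List String),
      front.length ≤ fuel →
      (fExpand targets adj max_hops hop fuel front seen nxt).2
          = pRound targets adj hop front seen nxt
        ∧ ((fExpand targets adj max_hops hop fuel front seen nxt).2.1 = none →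
            (fExpand targets adj max_hops hop fuel front seen nxt).1 = fuel - front.length) := by
  intro front
  induction front with
  | nil => intro fuel seen nxt _; cases fuel <;> simp [fExpand, pRound]
  | cons u us ih =>
    intro fuel seen nxt hle
    cases fuel with
    | zero => simp at hle
    | succ f =>
      simp only [fExpand, pRound]
      rcases hv : fVisit targets hop (PySem.Dict.getD adj u []) seen nxt with ⟨r, seen', nxt'⟩
      cases r with
      | some r => simp
      | none =>
        have hle' : us.length ≤ f := by simpa using hle
        obtain ⟨h1, h2⟩ := ih f seen' nxt' hle'
        refine ⟨h1, fun hn => ?_⟩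
        rw [h2 hn]
        simp only [List.length_cons]
        omega

-- fVisit: target hit iff some (unseen) neighbour is a target; seen never holds a target
theorem fVisit_hit (targets : List String) (hop : Int) :
    ∀ (vs : List String) (seen : PySem.Set String) (nxt : List String),
      (∀ x, x ∈ seen → x ∉ targets) → (∃ v ∈ vs, v ∈ targets) →
      (fVisit targets hop vs seen nxt).1 = some (hop + 1) := by
  intro vs
  induction vs with
  | nil => intro seen nxt _ hex; rcases hex with ⟨v, hv, _⟩; cases hv
  | cons v vt ih =>
    intro seen nxt hseen hex
    simp only [fVisit]
    by_cases hv : v ∈ seen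
    · rw [(PySem.Set.contains_iff _ _).mpr hv]
      simp only [if_true]
      refine ih seen nxt hseen ?_
      rcases hex with ⟨w, hw, hwt⟩
      rcases List.mem_cons.mp hw with rfl | hw'
      · exact absurd hwt (hseen w hv)
      · exact ⟨w, hw', hwt⟩
    · have hc : PySem.Set.contains seen v = false := by
        cases hc : PySem.Set.contains seen v with
        | true => exact absurd ((PySem.Set.contains_iff _ _).mp hc) hv
        | false => rfl
      rw [hc]
      simp only [Bool.false_eq_true, if_false]
      by_cases hvt : v ∈ targets
      · simp [hvt]
      · have h2' : targets.contains v = false := by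
          cases hct : targets.contains v with
          | true => exact absurd (by simpa using hct) hvt
          | false => rfl
        rw [h2']
        simp only [Bool.false_eq_true, if_false]
        refine ih (PySem.Set.add seen v) (nxt ++ [v]) ?_ ?_
        · intro x hx
          rcases (PySem.Set.mem_add seen v x).mp hx with hx' | rfl
          · exact hseen x hx'
          · exact hvt
        · rcases hex with ⟨w, hw, hwt⟩
          rcases List.mem_cons.mp hw with rfl | hw'
          · exact absurd hwt hvt
          · exact ⟨w, hw', hwt⟩

-- fVisit with no target among the neighbours: full description of the result
theorem fVisit_none (targets : List String) (hop : Int) :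
    ∀ (vs : List String) (seen : PySem.Set String) (nxt : List String),
      (∀ v ∈ vs, v ∉ targets) →
      (fVisit targets hop vs seen nxt).1 = none
      ∧ (∀ x, x ∈ (fVisit targets hop vs seen nxt).2.1 ↔ x ∈ seen ∨ x ∈ vs)
      ∧ (∀ x, x ∈ (fVisit targets hop vs seen nxt).2.2 ↔ x ∈ nxt ∨ (x ∈ vs ∧ x ∉ seen))
      ∧ (fVisit targets hop vs seen nxt).2.1.length + nxt.length
          = seen.length + (fVisit targets hop vs seen nxt).2.2.length
      ∧ (seen.Nodup → (fVisit targets hop vs seen nxt).2.1.Nodup) := by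
  intro vs
  induction vs with
  | nil => intro seen nxt _; simp [fVisit]
  | cons v vt ih =>
    intro seen nxt hno
    have hvt : v ∉ targets := hno v (List.mem_cons_self ..)
    have hrest : ∀ w ∈ vt, w ∉ targets := fun w hw => hno w (List.mem_cons_of_mem _ hw)
    simp only [fVisit]
    by_cases hv : v ∈ seen
    · rw [(PySem.Set.contains_iff _ _).mpr hv]
      simp only [if_true]
      obtain ⟨h1, h2, h3, h4, h5⟩ := ih seen nxt hrest
      refine ⟨h1, ?_, ?_, h4, h5⟩
      · intro x
        rw [h2 x]
        simp only [List.mem_cons]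
        constructor
        · rintro (hx | hx) <;> tauto
        · rintro (hx | rfl | hx) <;> tauto
      · intro x
        rw [h3 x]
        simp only [List.mem_cons]
        constructor
        · rintro (hx | ⟨hx1, hx2⟩) <;> tauto
        · rintro (hx | ⟨(rfl | hx1), hx2⟩) <;> tauto
    · have hc : PySem.Set.contains seen v = false := by
        cases hc : PySem.Set.contains seen v with
        | true => exact absurd ((PySem.Set.contains_iff _ _).mp hc) hv
        | false => rfl
      have h2' : targets.contains v = false := by
        cases hct : targets.contains v with
        | true => exact absurd (by simpa using hct) hvt
        | false => rfl
      rw [hc, h2']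
      simp only [Bool.false_eq_true, if_false]
      obtain ⟨h1, h2, h3, h4, h5⟩ := ih (PySem.Set.add seen v) (nxt ++ [v]) hrest
      have hadd : PySem.Set.add seen v = seen ++ [v] := PySem.Set.add_of_not_mem hv
      have hlen : (PySem.Set.add seen v).length = seen.length + 1 := by
        rw [hadd]; simp
      refine ⟨h1, ?_, ?_, ?_, fun hnd => h5 (PySem.Set.nodup_add seen v hnd)⟩
      · intro x
        rw [h2 x]
        simp only [PySem.Set.mem_add, List.mem_cons]
        constructor
        · rintro ((hx | rfl) | hx) <;> tauto
        · rintro (hx | rfl | hx) <;> tauto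
      · intro x
        rw [h3 x]
        simp only [PySem.Set.mem_add, List.mem_append, List.mem_cons, List.not_mem_nil,
          or_false]
        constructor
        · rintro ((hx | rfl) | ⟨hx1, hx2⟩) <;> tauto
        · rintro (hx | ⟨(rfl | hx1), hx2⟩) <;> tauto
      · simp only [List.length_append, List.length_singleton] at h4
        omega

-- pRound: target hit iff some frontier node has a target neighbour
theorem pRound_hit (targets : List String) (adj : PySem.Dict String (List String)) (hop : Int) :
    ∀ (front : List String) (seen : PySem.Set String) (nxt : List String),
      (∀ x, x ∈ seen → x ∉ targets) →
      (∃ u ∈ front, ∃ v ∈ PySem.Dict.getD adj u [], v ∈ targets) →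
      (pRound targets adj hop front seen nxt).1 = some (hop + 1) := by
  intro front
  induction front with
  | nil => intro seen nxt _ hex; rcases hex with ⟨u, hu, _⟩; cases hu
  | cons u us ih =>
    intro seen nxt hseen hex
    simp only [pRound]
    by_cases hu : ∃ v ∈ PySem.Dict.getD adj u [], v ∈ targets
    · have := fVisit_hit targets hop (PySem.Dict.getD adj u []) seen nxt hseen hu
      rcases hv : fVisit targets hop (PySem.Dict.getD adj u []) seen nxt with ⟨r, s', n'⟩
      rw [hv] at this
      simp only at this
      subst this
      simp
    · push Not at hu
      obtain ⟨h1, h2, _, _, _⟩ := fVisit_none targets hop (PySem.Dict.getD adj u []) seen nxt hu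
      rcases hv : fVisit targets hop (PySem.Dict.getD adj u []) seen nxt with ⟨r, s', n'⟩
      rw [hv] at h1 h2
      simp only at h1 h2
      subst h1
      simp only
      refine ih s' n' ?_ ?_
      · intro x hx
        rcases (h2 x).mp hx with hx' | hx'
        · exact hseen x hx'
        · exact hu x hx'
      · rcases hex with ⟨w, hw, hwt⟩
        rcases List.mem_cons.mp hw with rfl | hw'
        · rcases hwt with ⟨v, hv, hvt⟩
          exact absurd hvt (hu v hv)
        · exact ⟨w, hw', hwt⟩

-- pRound with no target reachable from the frontier: full description of the result
theorem pRound_none (targets : List String) (adj : PySem.Dict String (List String)) (hop : Int) :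
    ∀ (front : List String) (seen : PySem.Set String) (nxt : List String),
      (∀ u ∈ front, ∀ v ∈ PySem.Dict.getD adj u [], v ∉ targets) →
      (pRound targets adj hop front seen nxt).1 = none
      ∧ (∀ x, x ∈ (pRound targets adj hop front seen nxt).2.1
            ↔ x ∈ seen ∨ ∃ u ∈ front, x ∈ PySem.Dict.getD adj u [])
      ∧ (∀ x, x ∈ (pRound targets adj hop front seen nxt).2.2
            ↔ x ∈ nxt ∨ ((∃ u ∈ front, x ∈ PySem.Dict.getD adj u []) ∧ x ∉ seen))
      ∧ (pRound targets adj hop front seen nxt).2.1.length + nxt.length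
          = seen.length + (pRound targets adj hop front seen nxt).2.2.length
      ∧ (seen.Nodup → (pRound targets adj hop front seen nxt).2.1.Nodup) := by
  intro front
  induction front with
  | nil => intro seen nxt _; simp [pRound]
  | cons u us ih =>
    intro seen nxt hno
    have hu : ∀ v ∈ PySem.Dict.getD adj u [], v ∉ targets := hno u (List.mem_cons_self ..)
    have hrest : ∀ w ∈ us, ∀ v ∈ PySem.Dict.getD adj w [], v ∉ targets :=
      fun w hw => hno w (List.mem_cons_of_mem _ hw)
    simp only [pRound]
    obtain ⟨h1, h2, h3, h4, h5⟩ := fVisit_none targets hop (PySem.Dict.getD adj u []) seen nxt hu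
    rcases hv : fVisit targets hop (PySem.Dict.getD adj u []) seen nxt with ⟨r, s', n'⟩
    rw [hv] at h1 h2 h3 h4 h5
    simp only at h1 h2 h3 h4 h5
    subst h1
    simp only
    obtain ⟨g1, g2, g3, g4, g5⟩ := ih s' n' hrest
    refine ⟨g1, ?_, ?_, ?_, fun hnd => g5 (h5 hnd)⟩
    · intro x
      rw [g2 x]
      simp only [List.mem_cons]
      constructor
      · rintro (hx | ⟨w, hw, hxw⟩)
        · rcases (h2 x).mp hx with hx' | hx'
          · exact Or.inl hx'
          · exact Or.inr ⟨u, Or.inl rfl, hx'⟩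
        · exact Or.inr ⟨w, Or.inr hw, hxw⟩
      · rintro (hx | ⟨w, (rfl | hw), hxw⟩)
        · exact Or.inl ((h2 x).mpr (Or.inl hx))
        · exact Or.inl ((h2 x).mpr (Or.inr hxw))
        · exact Or.inr ⟨w, hw, hxw⟩
    · intro x
      rw [g3 x]
      simp only [List.mem_cons]
      constructor
      · rintro (hx | ⟨⟨w, hw, hxw⟩, hxs⟩)
        · rcases (h3 x).mp hx with hx' | ⟨hx1, hx2⟩
          · exact Or.inl hx'
          · exact Or.inr ⟨⟨u, Or.inl rfl, hx1⟩, hx2⟩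
        · have hxseen : x ∉ seen := fun hc => hxs ((h2 x).mpr (Or.inl hc))
          exact Or.inr ⟨⟨w, Or.inr hw, hxw⟩, hxseen⟩
      · rintro (hx | ⟨⟨w, (rfl | hw), hxw⟩, hxs⟩)
        · exact Or.inl ((h3 x).mpr (Or.inl hx))
        · exact Or.inl ((h3 x).mpr (Or.inr ⟨hxw, hxs⟩))
        · by_cases hxs' : x ∈ s'
          · rcases (h2 x).mp hxs' with hc | hc
            · exact absurd hc hxs
            · exact Or.inl ((h3 x).mpr (Or.inr ⟨hc, hxs⟩))
          · exact Or.inr ⟨⟨w, hw, hxw⟩, hxs'⟩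
    · omega

-- membership in B's round expansion
theorem mem_bNew_aux (adj : PySem.Dict String (List String)) :
    ∀ (l : List String) (acc : PySem.Set String) (x : String),
      x ∈ l.foldl (fun a u => PySem.Set.update a (PySem.Dict.getD adj u [])) acc
        ↔ x ∈ acc ∨ ∃ u ∈ l, x ∈ PySem.Dict.getD adj u [] := by
  intro l
  induction l with
  | nil => intro acc x; simp
  | cons u us ih =>
    intro acc x
    simp only [List.foldl_cons, ih, PySem.Set.mem_update, List.mem_cons]
    constructor
    · rintro ((hx | hx) | ⟨w, hw, hxw⟩)
      · exact Or.inl hx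
      · exact Or.inr ⟨u, Or.inl rfl, hx⟩
      · exact Or.inr ⟨w, Or.inr hw, hxw⟩
    · rintro (hx | ⟨w, (rfl | hw), hxw⟩)
      · exact Or.inl (Or.inl hx)
      · exact Or.inl (Or.inr hxw)
      · exact Or.inr ⟨w, hw, hxw⟩

theorem mem_bNew (adj : PySem.Dict String (List String)) (reach : PySem.Set String) (x : String) :
    x ∈ bNew adj reach ↔ ∃ u ∈ reach, x ∈ PySem.Dict.getD adj u [] := by
  unfold bNew
  rw [mem_bNew_aux]
  simp [PySem.Set.empty]

-- every adjacency value of the built dict occurs among the raw adjacency values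
theorem items_foldl_insert_sub (p : String × List String) :
    ∀ (l : List (String × List String)) (d : PySem.Dict String (List String)),
      p ∈ (l.foldl (fun d q => d.insert q.1 q.2) d).items → p ∈ d.items ∨ p ∈ l := by
  intro l
  induction l with
  | nil => intro d h; exact Or.inl h
  | cons q qs ih =>
    intro d h
    rcases ih (d.insert q.1 q.2) h with h' | h'
    · rcases (PySem.Dict.mem_items_insert _ _ _ _).mp h' with rfl | ⟨hd, _⟩
      · exact Or.inr (List.mem_cons_self ..)
      · exact Or.inl hd
    · exact Or.inr (List.mem_cons_of_mem _ h')

theorem getD_ofList_sub (adj : List (String × List String)) (u v : String)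
    (h : v ∈ (PySem.Dict.ofList adj).getD u []) : v ∈ adj.flatMap Prod.snd := by
  rcases hg : (PySem.Dict.ofList adj).get? u with _ | vs
  · rw [PySem.Dict.getD_eq_get?_getD, hg] at h
    simp at h
  · rw [PySem.Dict.getD_eq_get?_getD, hg] at h
    simp only [Option.getD_some] at h
    have hmem : (u, vs) ∈ (PySem.Dict.ofList adj).items :=
      PySem.Dict.mem_items_of_get?_eq_some _ hg
    have : (u, vs) ∈ (PySem.Dict.empty (κ := String) (ν := List String)).items ∨ (u, vs) ∈ adj :=
      items_foldl_insert_sub (u, vs) adj PySem.Dict.empty hmem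
    rcases this with hc | hadj
    · cases hc
    · exact List.mem_flatMap.mpr ⟨(u, vs), hadj, h⟩

theorem pvFuel_eq_aux :
    ∀ (l : List (String × List String)) (c : Nat),
      l.foldl (fun a p => a + p.2.length) c = c + (l.flatMap Prod.snd).length := by
  intro l
  induction l with
  | nil => intro c; simp
  | cons p ps ih =>
    intro c
    simp only [List.foldl_cons, List.flatMap_cons, List.length_append, ih]
    omega

theorem pvFuel_eq (adj : List (String × List String)) :
    pvFuel adj = (adj.flatMap Prod.snd).length + 2 := by
  unfold pvFuel
  rw [pvFuel_eq_aux]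
  omega

-- ===== main simulation: frontier BFS = saturation =====
theorem sat_sim (targets : List String) (adj : PySem.Dict String (List String)) (max_hops : Int)
    (a : String) (AV : List String)
    (HAV : ∀ u v, v ∈ PySem.Dict.getD adj u [] → v ∈ AV) :
    ∀ (rounds fuel : Nat) (frontier : List String) (seen reach : PySem.Set String) (hop : Int),
      (∀ x, x ∈ seen ↔ x ∈ reach) →
      (∀ x, x ∈ seen → x ∉ targets) →
      (∀ u, u ∈ seen → u ∉ frontier → ∀ v, v ∈ PySem.Dict.getD adj u [] → v ∈ seen) →
      (∀ u, u ∈ frontier → u ∈ seen) →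
      rounds = (max_hops - hop).toNat →
      frontier.length + AV.length + 2 ≤ fuel + seen.length →
      seen.Nodup →
      (∀ x, x ∈ seen → x = a ∨ x ∈ AV) →
      fLoop targets adj max_hops fuel frontier seen hop
        = sLoop targets adj max_hops rounds hop reach := by
  intro rounds
  induction rounds with
  | zero =>
    intro fuel frontier seen reach hop _ _ _ _ h5 _ _ _
    have hle : max_hops ≤ hop := by omega
    cases frontier with
    | nil => rw [fLoop]; rfl
    | cons u us => rw [fLoop]; simp [hle, sLoop]
  | succ r ih =>
    intro fuel frontier seen reach hop h1 h2 h3 h4 h5 h6 h7 h8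
    have hlt : hop < max_hops := by omega
    cases frontier with
    | nil =>
      rw [fLoop]
      simp only [sLoop]
      have hnew : ∀ x, x ∈ bNew adj reach → x ∈ seen := by
        intro x hx
        rcases (mem_bNew adj reach x).mp hx with ⟨w, hw, hxw⟩
        exact h3 w ((h1 w).mpr hw) (by simp) x hxw
      have hint : PySem.Set.inter (bNew adj reach) targets = [] := by
        rw [List.eq_nil_iff_forall_not_mem]
        intro x hx
        rcases (PySem.Set.mem_inter _ _ _).mp hx with ⟨hx1, hx2⟩
        exact h2 x (hnew x hx1) hx2
      have hdif : PySem.Set.diff (bNew adj reach) reach = [] := by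
        rw [List.eq_nil_iff_forall_not_mem]
        intro x hx
        rcases (PySem.Set.mem_diff _ _ _).mp hx with ⟨hx1, hx2⟩
        exact hx2 ((h1 x).mp (hnew x hx1))
      rw [if_neg (by simpa using hint), if_pos hdif]
    | cons u us =>
      have hseenlen : seen.length ≤ AV.length + 1 := by
        have hsub : seen ⊆ a :: AV := by
          intro x hx
          rcases h8 x hx with rfl | hx2
          · exact List.mem_cons_self ..
          · exact List.mem_cons_of_mem _ hx2
        have := (List.subperm_of_subset h7 hsub).length_le
        simpa using this
      have hfuel_ge : (u :: us).length ≤ fuel := by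
        simp only [List.length_cons] at h6 ⊢
        omega
      rw [fLoop]
      rw [if_neg (by omega)]
      obtain ⟨hxeq, hxfuel⟩ :=
        fExpand_eq_pRound targets adj max_hops hop (u :: us) fuel seen [] hfuel_ge
      simp only [sLoop]
      by_cases hhit : ∃ w ∈ (u :: us), ∃ v ∈ PySem.Dict.getD adj w [], v ∈ targets
      · -- some frontier node has a target neighbour: both return hop + 1
        have hpr := pRound_hit targets adj hop (u :: us) seen [] h2 hhit
        have hint : PySem.Set.inter (bNew adj reach) targets ≠ [] := by
          rcases hhit with ⟨w, hw, v, hv, hvt⟩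
          refine List.ne_nil_of_mem (a := v) ?_
          refine (PySem.Set.mem_inter _ _ _).mpr ⟨?_, hvt⟩
          exact (mem_bNew adj reach v).mpr ⟨w, (h1 w).mp (h4 w hw), hv⟩
        rw [if_pos hint]
        rcases hex : fExpand targets adj max_hops hop fuel (u :: us) seen []
          with ⟨f', o, s', n'⟩
        rw [hex] at hxeq
        have ho : o = some (hop + 1) := by
          have h := congrArg Prod.fst hxeq
          simpa [hpr] using h
        subst ho
        simp
      · push Not at hhit
        obtain ⟨g1, g2, g3, g4, g5⟩ := pRound_none targets adj hop (u :: us) seen [] hhit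
        rcases hex : fExpand targets adj max_hops hop fuel (u :: us) seen []
          with ⟨f', o, s', n'⟩
        rw [hex] at hxeq hxfuel
        rcases hpr : pRound targets adj hop (u :: us) seen [] with ⟨o2, s2, n2⟩
        rw [hpr] at hxeq g1 g2 g3 g4 g5
        simp only at hxeq g1 g2 g3 g4 g5
        obtain ⟨ho, hs, hn⟩ : o = o2 ∧ s' = s2 ∧ n' = n2 := by
          refine ⟨congrArg (Prod.fst) hxeq, ?_, ?_⟩
          · have := congrArg (fun z => z.2.1) hxeq; simpa using this
          · have := congrArg (fun z => z.2.2) hxeq; simpa using this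
        subst ho hs hn
        subst g1
        have hf' : f' = fuel - (u :: us).length := by simpa using hxfuel rfl
        simp only
        -- saturation side: no target in the whole-set expansion either
        have hint : PySem.Set.inter (bNew adj reach) targets = [] := by
          rw [List.eq_nil_iff_forall_not_mem]
          intro x hx
          rcases (PySem.Set.mem_inter _ _ _).mp hx with ⟨hx1, hx2⟩
          rcases (mem_bNew adj reach x).mp hx1 with ⟨w, hw, hxw⟩
          by_cases hwf : w ∈ (u :: us)
          · exact hhit w hwf x hxw hx2
          · exact h2 x (h3 w ((h1 w).mpr hw) hwf x hxw) hx2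
        rw [if_neg (by simpa using hint)]
        -- fresh (set difference) has exactly the members of the next frontier n'
        have hfr_iff : ∀ x, x ∈ PySem.Set.diff (bNew adj reach) reach ↔ x ∈ n' := by
          intro x
          rw [PySem.Set.mem_diff _ _ x, mem_bNew, g3 x]
          simp only [List.not_mem_nil, false_or]
          constructor
          · rintro ⟨⟨w, hw, hxw⟩, hxr⟩
            have hxs : x ∉ seen := fun hc => hxr ((h1 x).mp hc)
            by_cases hwf : w ∈ (u :: us)
            · exact ⟨⟨w, hwf, hxw⟩, hxs⟩
            · exact absurd ((h1 x).mp (h3 w ((h1 w).mpr hw) hwf x hxw)) hxr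
          · rintro ⟨⟨w, hw, hxw⟩, hxs⟩
            exact ⟨⟨w, (h1 w).mp (h4 w hw), hxw⟩, fun hc => hxs ((h1 x).mpr hc)⟩
        by_cases hfe : PySem.Set.diff (bNew adj reach) reach = []
        · rw [if_pos hfe]
          have hn' : n' = [] := by
            rw [List.eq_nil_iff_forall_not_mem]
            intro x hx
            have := (hfr_iff x).mpr hx
            rw [hfe] at this
            cases this
          subst hn'
          rw [fLoop]
        · rw [if_neg hfe]
          refine ih f' n' s' (PySem.Set.union reach (PySem.Set.diff (bNew adj reach) reach))
            (hop + 1) ?_ ?_ ?_ ?_ ?_ ?_ ?_ ?_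
          · intro x
            rw [PySem.Set.mem_union _ _ x, hfr_iff x]
            constructor
            · intro hx
              rcases (g2 x).mp hx with hx' | hex2
              · exact Or.inl ((h1 x).mp hx')
              · by_cases hxs : x ∈ seen
                · exact Or.inl ((h1 x).mp hxs)
                · exact Or.inr ((g3 x).mpr (Or.inr ⟨hex2, hxs⟩))
            · rintro (hx | hx)
              · exact (g2 x).mpr (Or.inl ((h1 x).mpr hx))
              · rcases (g3 x).mp hx with hc | ⟨hex2, _⟩
                · cases hc
                · exact (g2 x).mpr (Or.inr hex2)
          · intro x hx
            rcases (g2 x).mp hx with hx' | ⟨w, hw, hxw⟩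
            · exact h2 x hx'
            · exact hhit w hw x hxw
          · intro w hw hwn v hv
            rcases (g2 w).mp hw with hw' | ⟨z, hz, hwz⟩
            · by_cases hwf : w ∈ (u :: us)
              · exact (g2 v).mpr (Or.inr ⟨w, hwf, hv⟩)
              · exact (g2 v).mpr (Or.inl (h3 w hw' hwf v hv))
            · by_cases hws : w ∈ seen
              · by_cases hwf : w ∈ (u :: us)
                · exact (g2 v).mpr (Or.inr ⟨w, hwf, hv⟩)
                · exact (g2 v).mpr (Or.inl (h3 w hws hwf v hv))
              · exact absurd ((g3 w).mpr (Or.inr ⟨⟨z, hz, hwz⟩, hws⟩)) hwn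
          · intro x hx
            rcases (g3 x).mp hx with hc | ⟨hex2, _⟩
            · cases hc
            · exact (g2 x).mpr (Or.inr hex2)
          · omega
          · have hfs : fuel - (u :: us).length + (u :: us).length = fuel :=
              Nat.sub_add_cancel hfuel_ge
            simp only [List.length_nil] at g4
            omega
          · exact g5 h7
          · intro x hx
            rcases (g2 x).mp hx with hx' | ⟨w, _, hxw⟩
            · exact h8 x hx'
            · exact Or.inr (HAV w x hxw)

-- ===== VERDICT (by name: the statement is the Claim_ definition above) =====
theorem min_hops_to_set_py_spec : Claim_equal_min_hops_to_set_py := by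
  intro start targets adj max_hops _
  unfold Spec_min_hops_to_set_py min_hops_to_set_py min_hops_to_set_py_alt
  split_ifs with hguard hstart0
  · rfl
  · rfl
  · -- main branch: start ∉ targets
    have hstart : start ∉ targets := by
      intro hc
      exact hguard (by simp [hc])
    have hsim := loop_sim targets (PySem.Dict.ofList adj) max_hops (pvFuel adj)
      [start] [] (PySem.Set.ofList [start]) 0
    simp only [List.map_cons, List.map_nil, List.append_nil] at hsim
    rw [hsim, ← fLoop_eq_fState]
    refine sat_sim targets (PySem.Dict.ofList adj) max_hops start (adj.flatMap Prod.snd)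
      (fun u v hv => getD_ofList_sub adj u v hv)
      max_hops.toNat (pvFuel adj) [start] (PySem.Set.ofList [start])
      (PySem.Set.ofList [start]) 0 (fun x => Iff.rfl) ?_ ?_ ?_ ?_ ?_ ?_ ?_
    · intro x hx
      rcases List.mem_singleton.mp hx with rfl
      exact hstart
    · intro u hu hnf
      exact absurd hu hnf
    · intro u hu
      exact hu
    · omega
    · show ([start] : List String).length + (adj.flatMap Prod.snd).length + 2
        ≤ pvFuel adj + ([start] : List String).length
      rw [pvFuel_eq]
      simp
      omega
    · exact List.nodup_singleton start
    · intro x hx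
      exact Or.inl (List.mem_singleton.mp hx)
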